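-- pv_equiv track=rewrite | github.com/mohamedaliELfeky/ChunkWise | chunkwise/utils/overlap.py | sliding_window_positions
-- ===== SOURCE A (Python) =====
-- from typing import List, Optional, Callable
--
-- def sliding_window_positions(
--     text_length: int,
--     window_size: int,
--     step_size: int,
-- ) -> List[tuple]:
--     """
--     Calculate start/end positions for sliding window chunking.
--
--     Args:
--         text_length: Length of text
--         window_size: Size of each window
--         step_size: Step between windows (window_size - overlap)
--
--     Returns:
--         List of (start, end) tuples
--     """
--     if text_length <= 0 or window_size <= 0 or step_size <= 0:
--         return []
--
--     positions = []
--     start = 0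
--
--     while start < text_length:
--         end = min(start + window_size, text_length)
--         positions.append((start, end))
--
--         if end >= text_length:
--             break
--
--         start += step_size
--
--     return positions
-- ===== SOURCE B (Python) =====
-- def sliding_window_positions(text_length, window_size, step_size):
--     if text_length <= 0 or window_size <= 0 or step_size <= 0:
--         return []
--     threshold = max(0, text_length - window_size)
--     k = -(-threshold // step_size)  # first window index whose end reaches text_length
--     if k * step_size < text_length:
--         count = k + 1
--     else:
--         count = (text_length - 1) // step_size + 1
--     return [(i * step_size, min(i * step_size + window_size, text_length))
--             for i in range(count)]
-- ===== Notes on version B (the rewrite author's own statement) =====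
-- stated objective: alternative
-- what changed: Replaces A's while loop that accumulates positions step by step with a closed-form ceiling-division computation of the window count followed by a single map over range(count).
import Mathlib
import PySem

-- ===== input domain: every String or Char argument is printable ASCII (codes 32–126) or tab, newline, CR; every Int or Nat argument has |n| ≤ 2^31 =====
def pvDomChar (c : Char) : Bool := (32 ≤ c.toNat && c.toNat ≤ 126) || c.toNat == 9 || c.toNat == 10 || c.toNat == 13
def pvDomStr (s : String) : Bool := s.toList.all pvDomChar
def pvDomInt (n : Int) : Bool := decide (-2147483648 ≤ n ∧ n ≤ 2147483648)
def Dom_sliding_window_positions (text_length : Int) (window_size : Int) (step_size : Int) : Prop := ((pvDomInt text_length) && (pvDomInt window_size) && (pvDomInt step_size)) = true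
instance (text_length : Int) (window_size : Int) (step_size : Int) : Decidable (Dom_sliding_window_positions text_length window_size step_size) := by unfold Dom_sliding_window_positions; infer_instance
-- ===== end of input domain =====

-- B replaces A's while loop by a closed-form window count (ceiling division) plus one map over range(count); same results, different decomposition (objective: alternative).

-- ===== PORT A =====
-- while loop of A; the extra '0 < step_size' conjunct only makes the recursion total
-- (A's caller guarantees it: with step_size ≤ 0 the loop is never entered).
def swpLoop (text_length window_size step_size : Int) (start : Int)
    (acc : List (Int × Int)) : List (Int × Int) :=
  if h : start < text_length ∧ 0 < step_size then
    let e := min (start + window_size) text_length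
    let acc' := acc ++ [(start, e)]
    if text_length ≤ e then acc'
    else swpLoop text_length window_size step_size (start + step_size) acc'
  else acc
termination_by (text_length - start).toNat
decreasing_by omega

def sliding_window_positions (text_length : Int) (window_size : Int) (step_size : Int) : List (Int × Int) :=
  if text_length ≤ 0 ∨ window_size ≤ 0 ∨ step_size ≤ 0 then []
  else swpLoop text_length window_size step_size 0 []

-- ===== PORT B =====
def swpCount (text_length window_size step_size : Int) : Int :=
  let threshold := max 0 (text_length - window_size)
  let k := -(PySem.Int.floordiv (-threshold) step_size)
  if k * step_size < text_length then k + 1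
  else PySem.Int.floordiv (text_length - 1) step_size + 1

def sliding_window_positions_alt (text_length : Int) (window_size : Int) (step_size : Int) : List (Int × Int) :=
  if text_length ≤ 0 ∨ window_size ≤ 0 ∨ step_size ≤ 0 then []
  else
    (PySem.List.pyRange 0 (swpCount text_length window_size step_size) 1).map
      (fun i => (i * step_size, min (i * step_size + window_size) text_length))

-- ===== PRECONDITION & SPEC =====
def Spec_sliding_window_positions (text_length : Int) (window_size : Int) (step_size : Int) (out : List (Int × Int)) : Prop := out = sliding_window_positions_alt text_length window_size step_size
instance (text_length : Int) (window_size : Int) (step_size : Int) (out : List (Int × Int)) : Decidable (Spec_sliding_window_positions text_length window_size step_size out) := by unfold Spec_sliding_window_positions; infer_instance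

-- ===== CLAIM (what is proved, stated in full; the proofs are below) =====
def Claim_equal_sliding_window_positions : Prop := ∀ (text_length : Int) (window_size : Int) (step_size : Int), Dom_sliding_window_positions text_length window_size step_size → Spec_sliding_window_positions text_length window_size step_size (sliding_window_positions text_length window_size step_size)

-- ===== LEMMAS AND PROOFS =====

-- unfolded form of swpCount (the lets zeta-reduced)
lemma swpCount_def (tl ws ss : Int) : swpCount tl ws ss =
    (if -(PySem.Int.floordiv (-(max 0 (tl - ws))) ss) * ss < tl
     then -(PySem.Int.floordiv (-(max 0 (tl - ws))) ss) + 1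
     else PySem.Int.floordiv (tl - 1) ss + 1) := rfl

-- Characterisation of the count N := swpCount: with tl, ws, ss > 0,
-- (1) 0 < N, (2) every index i < N gives a start i*ss < tl,
-- (3) if the window at i < N reaches the end (tl ≤ i*ss + ws) then i = N-1,
-- (4) if the window at N-1 does NOT reach the end then N*ss is out of range (tl ≤ N*ss).
lemma swpCount_pos (tl ws ss : Int) (htl : 0 < tl) (hss : 0 < ss) :
    0 < swpCount tl ws ss := by
  rw [swpCount_def]
  set t := max 0 (tl - ws) with ht
  have hk := (PySem.Int.neg_floordiv_neg_eq_iff_of_pos (a := t) (b := ss)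
    (q := -(PySem.Int.floordiv (-t) ss)) hss).mp rfl
  have hm := (PySem.Int.floordiv_eq_iff_of_pos (a := tl - 1) (b := ss)
    (q := PySem.Int.floordiv (tl - 1) ss) hss).mp rfl
  set k := -(PySem.Int.floordiv (-t) ss) with hkdef
  set m := PySem.Int.floordiv (tl - 1) ss with hmdef
  have hk0 : 0 ≤ k := by nlinarith [hk.1, hk.2, le_max_left 0 (tl - ws)]
  have hm0 : 0 ≤ m := by nlinarith [hm.1, hm.2]
  split <;> omega

lemma swpCount_start_lt (tl ws ss i : Int) (htl : 0 < tl) (hss : 0 < ss)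
    (hi0 : 0 ≤ i) (hiN : i < swpCount tl ws ss) : i * ss < tl := by
  rw [swpCount_def] at hiN
  set t := max 0 (tl - ws) with ht
  have hk := (PySem.Int.neg_floordiv_neg_eq_iff_of_pos (a := t) (b := ss)
    (q := -(PySem.Int.floordiv (-t) ss)) hss).mp rfl
  have hm := (PySem.Int.floordiv_eq_iff_of_pos (a := tl - 1) (b := ss)
    (q := PySem.Int.floordiv (tl - 1) ss) hss).mp rfl
  set k := -(PySem.Int.floordiv (-t) ss) with hkdef
  set m := PySem.Int.floordiv (tl - 1) ss with hmdef
  by_cases hcase : k * ss < tl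
  · rw [if_pos hcase] at hiN
    have : i ≤ k := by omega
    nlinarith
  · rw [if_neg hcase] at hiN
    have : i ≤ m := by omega
    nlinarith [hm.1]

lemma swpCount_last (tl ws ss i : Int) (htl : 0 < tl) (hss : 0 < ss)
    (hi0 : 0 ≤ i) (hiN : i < swpCount tl ws ss) (hbreak : tl ≤ i * ss + ws) :
    i = swpCount tl ws ss - 1 := by
  rw [swpCount_def] at *
  set t := max 0 (tl - ws) with ht
  have hk := (PySem.Int.neg_floordiv_neg_eq_iff_of_pos (a := t) (b := ss)
    (q := -(PySem.Int.floordiv (-t) ss)) hss).mp rfl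
  have hm := (PySem.Int.floordiv_eq_iff_of_pos (a := tl - 1) (b := ss)
    (q := PySem.Int.floordiv (tl - 1) ss) hss).mp rfl
  set k := -(PySem.Int.floordiv (-t) ss) with hkdef
  set m := PySem.Int.floordiv (tl - 1) ss with hmdef
  -- from tl - ws ≤ i*ss and 0 ≤ i*ss we get t ≤ i*ss, hence k ≤ i
  have hti : t ≤ i * ss := by
    have : 0 ≤ i * ss := mul_nonneg hi0 (le_of_lt hss)
    omega
  have hki : k ≤ i := by nlinarith [hk.1]
  by_cases hcase : k * ss < tl
  · rw [if_pos hcase] at hiN ⊢; omega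
  · rw [if_neg hcase] at hiN ⊢
    exfalso
    have him : i ≤ m := by omega
    have h1 : i * ss ≤ m * ss := by nlinarith
    have h2 : k * ss ≤ i * ss := by nlinarith
    nlinarith [hm.1]

lemma swpCount_end (tl ws ss : Int) (htl : 0 < tl) (hss : 0 < ss)
    (hnb : (swpCount tl ws ss - 1) * ss + ws < tl) :
    tl ≤ swpCount tl ws ss * ss := by
  rw [swpCount_def] at *
  set t := max 0 (tl - ws) with ht
  have hk := (PySem.Int.neg_floordiv_neg_eq_iff_of_pos (a := t) (b := ss)
    (q := -(PySem.Int.floordiv (-t) ss)) hss).mp rfl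
  have hm := (PySem.Int.floordiv_eq_iff_of_pos (a := tl - 1) (b := ss)
    (q := PySem.Int.floordiv (tl - 1) ss) hss).mp rfl
  set k := -(PySem.Int.floordiv (-t) ss) with hkdef
  set m := PySem.Int.floordiv (tl - 1) ss with hmdef
  by_cases hcase : k * ss < tl
  · rw [if_pos hcase] at hnb ⊢
    exfalso
    have : t ≤ k * ss := hk.2
    have : tl - ws ≤ t := le_max_right 0 (tl - ws)
    simp only [add_sub_cancel_right] at hnb
    omega
  · rw [if_neg hcase] at hnb ⊢
    have := hm.2
    simp only [add_sub_cancel_right] at *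
    nlinarith

lemma swpLoop_eq (tl ws ss : Int) (htl : 0 < tl) (hws : 0 < ws) (hss : 0 < ss) :
    ∀ n (i : Int) acc, (swpCount tl ws ss - i).toNat ≤ n → 0 ≤ i → i < swpCount tl ws ss →
      swpLoop tl ws ss (i * ss) acc =
        acc ++ (PySem.List.pyRange i (swpCount tl ws ss) 1).map
          (fun j => (j * ss, min (j * ss + ws) tl)) := by
  intro n
  induction n with
  | zero => intro i acc hfuel hi0 hiN; omega
  | succ n ih =>
    intro i acc hfuel hi0 hiN
    set N := swpCount tl ws ss with hN
    have hstart : i * ss < tl := swpCount_start_lt tl ws ss i htl hss hi0 hiN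
    rw [swpLoop, dif_pos ⟨hstart, hss⟩]
    simp only
    by_cases hb : tl ≤ min (i * ss + ws) tl
    · rw [if_pos hb]
      have hlast : i = N - 1 :=
        swpCount_last tl ws ss i htl hss hi0 hiN (by omega)
      rw [PySem.List.pyRange_one_cons (by omega) , PySem.List.pyRange_one_eq_nil (by omega)]
      simp
    · rw [if_neg hb]
      have he : i * ss + ws < tl := by omega
      have harith : i * ss + ss = (i + 1) * ss := by ring
      by_cases hnext : i + 1 < N
      · rw [PySem.List.pyRange_one_cons (show i < N by omega), harith,
           ih (i + 1) (acc ++ [(i * ss, min (i * ss + ws) tl)]) (by omega) (by omega) hnext]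
        simp
      · have hi' : i = N - 1 := by omega
        have hout : tl ≤ N * ss := swpCount_end tl ws ss htl hss (by rw [← hi']; exact he)
        rw [harith, swpLoop, dif_neg (by rw [hi']; simp only [sub_add_cancel]; omega)]
        rw [PySem.List.pyRange_one_cons (by omega), PySem.List.pyRange_one_eq_nil (by omega)]
        simp

-- ===== VERDICT (by name: the statement is the Claim_ definition above) =====
theorem sliding_window_positions_spec : Claim_equal_sliding_window_positions := by
  intro tl ws ss _
  unfold Spec_sliding_window_positions sliding_window_positions sliding_window_positions_alt
  by_cases hg : tl ≤ 0 ∨ ws ≤ 0 ∨ ss ≤ 0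
  · rw [if_pos hg, if_pos hg]
  · rw [if_neg hg, if_neg hg]
    push Not at hg
    obtain ⟨htl, hws, hss⟩ := hg
    have h0 : (0 : Int) = 0 * ss := by ring
    rw [h0, swpLoop_eq tl ws ss (by omega) (by omega) (by omega)
      (swpCount tl ws ss).toNat 0 [] (by omega) (by omega)
      (swpCount_pos tl ws ss (by omega) (by omega))]
    simp
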